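-- pv_equiv track=rewrite | github.com/Sycamore-Ma/Algorithm-Practice-Problem-Set | Codeforces/2132D.py | prefix_dp_sum
-- ===== SOURCE A (Python) =====
-- def prefix_dp_sum(n):
--     if n < 0:
--         return 0
--     ans = 0
--     pow = 1
--     while pow <= n:
--         next = n // (pow * 10)
--         digit = (n // pow) % 10
--         right = n % pow
--         ans += next * 45 * pow
--         ans += (digit * (digit - 1) // 2) * pow
--         ans += digit * (right + 1)
--         pow *= 10
--     return ans
-- ===== SOURCE B (Python) =====
-- def prefix_dp_sum(n):
--     if n < 0:
--         return 0
--     return _total(n)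
--
--
-- def _dsum(k):
--     s = 0
--     while k > 0:
--         s += k % 10
--         k //= 10
--     return s
--
--
-- def _total(m):
--     # sum of digit sums of 0..m, by recursion on m // 10:
--     # writing k = 10*a + b, digitsum(k) = digitsum(a) + b.
--     if m < 10:
--         return m * (m + 1) // 2
--     q, r = m // 10, m % 10
--     return 10 * _total(q) + (r + 1 - 10) * _dsum(q) + 45 * q + r * (r + 1) // 2
-- ===== Notes on version B (the rewrite author's own statement) =====
-- stated objective: alternative
-- what changed: Replaces the place-value loop (closed-form contribution of each decimal position of n) by a recursion on n//10: total(n) is expressed through total(n//10) plus a digit-sum correction, with a separate digit-sum helper.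
import Mathlib
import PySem

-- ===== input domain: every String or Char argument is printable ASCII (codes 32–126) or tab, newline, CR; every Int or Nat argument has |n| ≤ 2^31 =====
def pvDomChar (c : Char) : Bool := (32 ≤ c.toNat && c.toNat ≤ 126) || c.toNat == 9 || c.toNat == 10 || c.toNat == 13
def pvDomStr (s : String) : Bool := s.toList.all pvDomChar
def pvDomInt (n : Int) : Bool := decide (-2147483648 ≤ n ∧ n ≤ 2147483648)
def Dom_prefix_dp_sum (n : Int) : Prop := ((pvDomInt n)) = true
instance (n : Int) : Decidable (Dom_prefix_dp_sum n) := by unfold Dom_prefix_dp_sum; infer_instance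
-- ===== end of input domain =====

-- B replaces A's place-value loop (closed-form per-digit-position contribution) by a recursion
-- on n // 10 with a digit-sum helper; same output, similar cost (objective: alternative).

-- ===== PORT A =====
-- A's while loop over pow = 1, 10, 100, …; the hp argument only makes the recursion total
-- (pow stays positive exactly as in A, where pow starts at 1 and is multiplied by 10).
def pvLoopA (n pow ans : Int) (hp : 0 < pow) : Int :=
  if h : pow ≤ n then
    pvLoopA n (pow * 10)
      (ans + PySem.Int.floordiv n (pow * 10) * 45 * pow
           + PySem.Int.floordiv
               (PySem.Int.mod (PySem.Int.floordiv n pow) 10 *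
                 (PySem.Int.mod (PySem.Int.floordiv n pow) 10 - 1)) 2 * pow
           + PySem.Int.mod (PySem.Int.floordiv n pow) 10 * (PySem.Int.mod n pow + 1))
      (by positivity)
  else ans
termination_by (n + 1 - pow).toNat
decreasing_by omega

def prefix_dp_sum (n : Int) : Int :=
  if n < 0 then 0 else pvLoopA n 1 0 (by norm_num)

-- ===== PORT B =====
-- _dsum: s = 0; while k > 0: s += k % 10; k //= 10; return s
def pvDsum (k s : Int) : Int :=
  if h : 0 < k then pvDsum (PySem.Int.floordiv k 10) (s + PySem.Int.mod k 10) else s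
termination_by k.toNat
decreasing_by
  rw [PySem.Int.floordiv_eq_ediv_of_pos (by norm_num)]; omega

-- _total: sum of digit sums of 0..m, by recursion on m // 10
def pvTotal (m : Int) : Int :=
  if h : m < 10 then PySem.Int.floordiv (m * (m + 1)) 2
  else
    10 * pvTotal (PySem.Int.floordiv m 10)
      + (PySem.Int.mod m 10 + 1 - 10) * pvDsum (PySem.Int.floordiv m 10) 0
      + 45 * PySem.Int.floordiv m 10
      + PySem.Int.floordiv (PySem.Int.mod m 10 * (PySem.Int.mod m 10 + 1)) 2
termination_by m.toNat
decreasing_by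
  rw [PySem.Int.floordiv_eq_ediv_of_pos (by norm_num)]; omega

def prefix_dp_sum_alt (n : Int) : Int :=
  if n < 0 then 0 else pvTotal n

-- ===== PRECONDITION & SPEC =====
def Spec_prefix_dp_sum (n : Int) (out : Int) : Prop := out = prefix_dp_sum_alt n
instance (n : Int) (out : Int) : Decidable (Spec_prefix_dp_sum n out) := by unfold Spec_prefix_dp_sum; infer_instance

-- ===== CLAIM (what is proved, stated in full; the proofs are below) =====
def Claim_equal_prefix_dp_sum : Prop := ∀ (n : Int), Dom_prefix_dp_sum n → Spec_prefix_dp_sum n (prefix_dp_sum n)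

-- ===== LEMMAS AND PROOFS =====

-- the loop's accumulator is additive
lemma pvLoopA_shift (n pow ans : Int) (hp : 0 < pow) :
    pvLoopA n pow ans hp = ans + pvLoopA n pow 0 hp := by
  by_cases h : pow ≤ n
  · conv_lhs => rw [pvLoopA]
    conv_rhs => rw [pvLoopA]
    simp only [dif_pos h]
    conv_lhs => rw [pvLoopA_shift n (pow * 10)]
    conv_rhs => rw [pvLoopA_shift n (pow * 10)]
    ring
  · conv_lhs => rw [pvLoopA]
    conv_rhs => rw [pvLoopA]
    simp [h]
termination_by (n + 1 - pow).toNat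
decreasing_by all_goals omega

-- dsum's accumulator is additive
lemma pvDsum_shift (k s : Int) : pvDsum k s = s + pvDsum k 0 := by
  by_cases h : 0 < k
  · conv_lhs => rw [pvDsum]
    conv_rhs => rw [pvDsum]
    simp only [dif_pos h]
    conv_lhs => rw [pvDsum_shift (PySem.Int.floordiv k 10)]
    conv_rhs => rw [pvDsum_shift (PySem.Int.floordiv k 10)]
    ring
  · conv_lhs => rw [pvDsum]
    conv_rhs => rw [pvDsum]
    simp [h]
termination_by k.toNat
decreasing_by all_goals (rw [PySem.Int.floordiv_eq_ediv_of_pos (by norm_num)]; omega)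

lemma pvDsum_step (k : Int) (h : 0 < k) :
    pvDsum k 0 = k % 10 + pvDsum (k / 10) 0 := by
  conv_lhs => rw [pvDsum]
  simp only [dif_pos h]
  rw [pvDsum_shift, PySem.Int.floordiv_eq_ediv_of_pos (by norm_num),
      PySem.Int.mod_eq_emod_of_pos (by norm_num)]
  ring

theorem div_shift (q r P : Int) (hP : 0 < P) (hr0 : 0 ≤ r) (hr : r < 10) :
    (10 * q + r) / (10 * P) = q / P ∧ (10 * q + r) % (10 * P) = 10 * (q % P) + r := by
  have h2 : 0 ≤ q % P := Int.emod_nonneg q (by omega)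
  have h3 : q % P < P := Int.emod_lt_of_pos q hP
  have key : 10 * q + r = (10 * (q % P) + r) + (10 * P) * (q / P) := by
    have h1 : P * (q / P) + q % P = q := Int.mul_ediv_add_emod q P
    linarith
  have hX0 : (0:Int) ≤ 10 * (q % P) + r := by omega
  have hXlt : 10 * (q % P) + r < 10 * P := by omega
  constructor
  · rw [key, Int.add_mul_ediv_left _ _ (by positivity : (0:Int) < 10 * P).ne',
        Int.ediv_eq_zero_of_lt hX0 hXlt, zero_add]
  · rw [key, Int.add_mul_emod_self_left, Int.emod_eq_of_lt hX0 hXlt]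

lemma pvDsum_zero (s : Int) : pvDsum 0 s = s := by
  rw [pvDsum]; norm_num

-- A's loop from place 10^(k+1) on n = 10*q + r, against the loop from place 10^k on q:
-- each place of n beyond the first contributes 10 times the matching place of q,
-- corrected by (r + 1 - 10) per digit of q (the digit sum of q / 10^k)
lemma pvLoopA_tail (M : Nat) : ∀ (k : Nat) (q r ans : Int), 0 ≤ q → 0 ≤ r → r < 10 →
    q / (10:Int)^k < (M : Int) →
    pvLoopA (10 * q + r) ((10:Int)^(k+1)) ans (by positivity) =
      ans + 10 * pvLoopA q ((10:Int)^k) 0 (by positivity)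
          + (r + 1 - 10) * pvDsum (q / (10:Int)^k) 0 := by
  induction M with
  | zero =>
    intro k q r ans hq hr0 hr hM
    have h0 : (0:Int) ≤ q / (10:Int)^k := Int.ediv_nonneg hq (by positivity)
    omega
  | succ M ih =>
    intro k q r ans hq hr0 hr hM
    have hPpos : (0:Int) < (10:Int)^k := by positivity
    by_cases hb : (10:Int)^(k+1) ≤ 10 * q + r
    · -- both loops step
      have hkq : (10:Int)^k ≤ q := by
        have : (10:Int)^(k+1) = 10 * (10:Int)^k := by ring
        omega
      have hds := div_shift q r ((10:Int)^k) hPpos hr0 hr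
      have hpow1 : (10:Int)^(k+1) = 10 * (10:Int)^k := by ring
      have hdiv1 : (10 * q + r) / (10:Int)^(k+1) = q / (10:Int)^k := by rw [hpow1]; exact hds.1
      have hmod1 : (10 * q + r) % (10:Int)^(k+1) = 10 * (q % (10:Int)^k) + r := by rw [hpow1]; exact hds.2
      have hds2 := div_shift q r ((10:Int)^(k+1)) (by positivity) hr0 hr
      have hdiv2 : (10 * q + r) / (10:Int)^(k+2) = q / (10:Int)^(k+1) := by
        rw [show ((10:Int)^(k+2)) = 10 * (10:Int)^(k+1) by ring]; exact hds2.1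
      -- quotient decreases
      have hq1 : 1 ≤ q / (10:Int)^k := Int.le_ediv_iff_mul_le hPpos |>.2 (by omega)
      have hqq : q / (10:Int)^(k+1) = (q / (10:Int)^k) / 10 := by
        rw [hpow1, mul_comm, ← Int.ediv_ediv_of_nonneg hPpos.le]
      have hMlt : q / (10:Int)^(k+1) < (M : Int) := by
        rw [hqq]; omega
      -- unfold both loops one step
      conv_lhs => rw [pvLoopA]
      conv_rhs => rw [pvLoopA]
      simp only [dif_pos hb, dif_pos hkq]
      rw [PySem.Int.floordiv_eq_ediv_of_pos (by positivity),
          PySem.Int.floordiv_eq_ediv_of_pos (by positivity),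
          PySem.Int.floordiv_eq_ediv_of_pos hPpos,
          PySem.Int.floordiv_eq_ediv_of_pos (by positivity),
          PySem.Int.floordiv_eq_ediv_of_pos (by positivity),
          PySem.Int.floordiv_eq_ediv_of_pos (by positivity),
          PySem.Int.mod_eq_emod_of_pos (by norm_num),
          PySem.Int.mod_eq_emod_of_pos (by norm_num),
          PySem.Int.mod_eq_emod_of_pos (by positivity),
          PySem.Int.mod_eq_emod_of_pos (by positivity)]
      simp only [← pow_succ]
      rw [hdiv2, hdiv1, hmod1]
      rw [ih (k+1) q r _ hq hr0 hr hMlt]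
      conv_rhs => rw [pvLoopA_shift q ((10:Int)^(k+1))]
      rw [pvDsum_step (q / (10:Int)^k) (by omega), ← hqq]
      ring
    · -- both loops stop
      have hkq : ¬ (10:Int)^k ≤ q := by
        have : (10:Int)^(k+1) = 10 * (10:Int)^k := by ring
        omega
      have hq0 : q / (10:Int)^k = 0 := Int.ediv_eq_zero_of_lt hq (by omega)
      conv_lhs => rw [pvLoopA]
      conv_rhs => rw [pvLoopA]
      simp only [dif_neg hb, dif_neg hkq]
      rw [hq0, pvDsum_zero]
      ring

-- A's whole loop computes B's recurrence, by strong induction on n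
lemma pvLoopA_eq_pvTotal (M : Nat) : ∀ (n : Int), 0 ≤ n → n < (M : Int) →
    pvLoopA n 1 0 (by norm_num) = pvTotal n := by
  induction M with
  | zero => intro n hn hM; omega
  | succ M ih =>
    intro n hn hM
    by_cases h10 : n < 10
    · rw [pvTotal]
      simp only [dif_pos h10]
      conv_lhs => rw [pvLoopA]
      by_cases h0 : (1:Int) ≤ n
      · simp only [dif_pos h0]
        conv_lhs => rw [pvLoopA]
        simp only [dif_neg (show ¬ (1*10:Int) ≤ n by omega)]
        rw [PySem.Int.floordiv_eq_ediv_of_pos (by norm_num),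
            PySem.Int.floordiv_eq_ediv_of_pos (by norm_num),
            PySem.Int.floordiv_eq_ediv_of_pos (by norm_num),
            PySem.Int.floordiv_eq_ediv_of_pos (by norm_num),
            PySem.Int.mod_eq_emod_of_pos (by norm_num),
            PySem.Int.mod_eq_emod_of_pos (by norm_num)]
        rw [Int.ediv_one, Int.emod_one,
            Int.ediv_eq_zero_of_lt hn (by omega), Int.emod_eq_of_lt hn h10]
        rw [show n * (n + 1) = n * (n - 1) + n * 2 by ring,
            Int.add_mul_ediv_right _ _ two_ne_zero]
        ring
      · simp only [dif_neg h0]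
        have hn0 : n = 0 := by omega
        subst hn0
        rw [PySem.Int.floordiv_eq_ediv_of_pos (by norm_num)]
        norm_num
    · -- n ≥ 10
      rw [pvTotal]
      simp only [dif_neg h10]
      conv_lhs => rw [pvLoopA]
      simp only [dif_pos (show (1:Int) ≤ n by omega)]
      rw [PySem.Int.floordiv_eq_ediv_of_pos (by norm_num : (0:Int) < 1*10),
          PySem.Int.floordiv_eq_ediv_of_pos (by norm_num : (0:Int) < 1),
          PySem.Int.floordiv_eq_ediv_of_pos (by norm_num : (0:Int) < 2),
          PySem.Int.mod_eq_emod_of_pos (by norm_num : (0:Int) < 10),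
          PySem.Int.mod_eq_emod_of_pos (by norm_num : (0:Int) < 1),
          PySem.Int.floordiv_eq_ediv_of_pos (by norm_num : (0:Int) < 10),
          PySem.Int.mod_eq_emod_of_pos (by norm_num : (0:Int) < 10),
          PySem.Int.floordiv_eq_ediv_of_pos (by norm_num : (0:Int) < 2)]
      have key : n = 10 * (n / 10) + n % 10 := (Int.mul_ediv_add_emod n 10).symm
      have T := pvLoopA_tail M 0 (n / 10) (n % 10)
        (0 + n / (1*10) * 45 * 1 + (n / 1 % 10 * (n / 1 % 10 - 1)) / 2 * 1 + n / 1 % 10 * (n % 1 + 1))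
        (by positivity) (Int.emod_nonneg n (by norm_num)) (Int.emod_lt_of_pos n (by norm_num))
        (by simpa using (by omega : n / 10 < (M : Int)))
      rw [← key] at T
      simp only [zero_add, pow_zero, pow_one, Int.ediv_one, Int.emod_one, one_mul, mul_one] at T ⊢
      rw [T, ih (n / 10) (by positivity) (by omega)]
      rw [show n % 10 * (n % 10 + 1) = n % 10 * (n % 10 - 1) + (n % 10) * 2 by ring,
          Int.add_mul_ediv_right _ _ two_ne_zero]
      ring

-- ===== VERDICT (by name: the statement is the Claim_ definition above) =====
theorem prefix_dp_sum_spec : Claim_equal_prefix_dp_sum := by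
  intro n _
  unfold Spec_prefix_dp_sum prefix_dp_sum prefix_dp_sum_alt
  by_cases h : n < 0
  · simp [h]
  · simp only [h, if_false]
    exact pvLoopA_eq_pvTotal (n.toNat + 1) n (by omega) (by omega)
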